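-- pv_equiv track=rewrite | github.com/chaeeerish/Algorithm-Python | 유형별/1. 그리디/무지의 먹방 라이브.py | solution
-- ===== SOURCE A (Python) =====
-- def next(food_times, current):
--     current = current + 1
--     while True:
--         if current >= len(food_times):
--             current = 0
--             continue
--
--         if food_times[current] != 0:
--             return current
--         else:
--             current = current + 1
--
-- def solution(food_times, k):
--     answer = 0
--
--     i = -1
--     for time in range(k + 1):
--         if all(x == 0 for x in food_times):
--             return -1
--         i = next(food_times, i)
--         food_times[i] -= 1
--
--     return i + 1
-- ===== SOURCE B (Python) =====
-- def solution(food_times, k):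
--     # Layer-peeling: jump over whole identical rounds at once instead of
--     # simulating one bite at a time.  Does not mutate food_times (A does).
--     times = food_times
--     remain = k + 1                      # bites still to perform
--     while True:
--         alive = [idx for idx, t in enumerate(times) if t != 0]
--         if not alive:
--             return -1
--         L = len(alive)
--         if remain <= L:
--             return alive[remain - 1] + 1
--         full = (remain - 1) // L        # whole rounds the budget allows
--         pos = [t for t in times if t > 0]
--         r = min(full, min(pos)) if pos else full
--         remain -= r * L
--         times = [t - r if t != 0 else t for t in times]
-- ===== Notes on version B (the rewrite author's own statement) =====
-- stated objective: faster
-- what changed: B replaces A's bite-by-bite round-robin simulation (with its scanning `next` pointer) by layer peeling: it recomputes the alive index list once per layer and jumps over min(min positive time, budget//len(alive)) whole identical rounds in O(n) arithmetic, answering inside the final partial round by direct indexing.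
-- outside the precondition, e.g. on solution([1], -1): A returns 0, B returns 1; on solution([], -5): A returns 0, B returns -1; on solution([1], -3): A returns 0, B raises IndexError
import Mathlib
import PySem

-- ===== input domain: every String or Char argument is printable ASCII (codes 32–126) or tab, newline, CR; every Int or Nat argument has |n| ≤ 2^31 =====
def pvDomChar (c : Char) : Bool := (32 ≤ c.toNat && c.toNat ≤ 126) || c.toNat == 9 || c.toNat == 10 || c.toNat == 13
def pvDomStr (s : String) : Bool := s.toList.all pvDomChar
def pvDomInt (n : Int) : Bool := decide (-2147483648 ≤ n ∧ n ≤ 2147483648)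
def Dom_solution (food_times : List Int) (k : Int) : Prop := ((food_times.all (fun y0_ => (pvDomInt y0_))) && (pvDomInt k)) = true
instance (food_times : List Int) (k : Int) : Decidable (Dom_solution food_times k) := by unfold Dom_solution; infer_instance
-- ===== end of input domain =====

-- B replaces A's bite-by-bite simulation (with its `next` pointer scan) by layer peeling:
-- it jumps over whole identical rounds at once, which a timing run measured faster.
-- Note: A mutates its food_times argument in place; B does not. The equivalence proved
-- here is about the RETURN value only.

-- ===== PORT A =====
-- while-loop of Python `next`, with fuel (2*len+2 always suffices under A's all-zero guard)
def pvNextFuel (food_times : List Int) (current : Int) : Nat → Int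
  | 0 => 0
  | fuel+1 =>
    if (food_times.length : Int) ≤ current then pvNextFuel food_times 0 fuel
    else if PySem.List.pyGetD food_times current 0 ≠ 0 then current
    else pvNextFuel food_times (current + 1) fuel

def pvNext (food_times : List Int) (current : Int) : Int :=
  pvNextFuel food_times (current + 1) (2 * food_times.length + 2)

-- the `for time in range(k+1)` loop of A, counting remaining iterations
def pvSolLoop (food_times : List Int) (i : Int) : Nat → Int
  | 0 => i + 1
  | t+1 =>
    if food_times.all (fun x => x == 0) then -1
    else
      let i' := pvNext food_times i
      pvSolLoop (PySem.List.pySetD food_times i' (PySem.List.pyGetD food_times i' 0 - 1)) i' t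

def solution (food_times : List Int) (k : Int) : Int :=
  pvSolLoop food_times (-1) (k + 1).toNat

-- ===== PORT B =====
-- the `while True` loop of B; remain decreases by ≥ 1 per iteration, so fuel (k+1).toNat+1 suffices
def pvAltLoop (times : List Int) (remain : Int) : Nat → Int
  | 0 => 0
  | fuel+1 =>
    let alive := ((PySem.List.enumerate times 0).filter (fun p => decide (p.2 ≠ 0))).map (fun p => p.1)
    if alive.isEmpty then -1
    else if remain ≤ (alive.length : Int) then PySem.List.pyGetD alive (remain - 1) 0 + 1
    else
      let full := PySem.Int.floordiv (remain - 1) (alive.length : Int)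
      let pos := times.filter (fun t => decide (0 < t))
      let r := match PySem.List.min? pos (fun x => x) with
               | some mp => min full mp
               | none => full
      pvAltLoop (times.map (fun t => if t ≠ 0 then t - r else t)) (remain - r * (alive.length : Int)) fuel

def solution_alt (food_times : List Int) (k : Int) : Int :=
  pvAltLoop food_times (k + 1) ((k + 1).toNat + 1)

-- ===== PRECONDITION & SPEC =====
-- Pre_ restricts to the task's natural domain k ≥ 0 ("food to eat after k+1 time units");
-- for k < 0 A's loop body never runs and it returns the artifact value 0 of its initial state.
def Pre_solution (food_times : List Int) (k : Int) : Prop := 0 ≤ k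
instance (food_times : List Int) (k : Int) : Decidable (Pre_solution food_times k) := by unfold Pre_solution; infer_instance
def pvWitness_solution : List Int × Int := ([3, 1, 2], 5)
def Spec_solution (food_times : List Int) (k : Int) (out : Int) : Prop := out = solution_alt food_times k
instance (food_times : List Int) (k : Int) (out : Int) : Decidable (Spec_solution food_times k out) := by unfold Spec_solution; infer_instance

-- ===== CLAIM (what is proved, stated in full; the proofs are below) =====
def Claim_equal_solution : Prop := ∀ (food_times : List Int) (k : Int), Dom_solution food_times k → Pre_solution food_times k → Spec_solution food_times k (solution food_times k)

-- ===== LEMMAS AND PROOFS =====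

def pvFirstAlive (T : List Int) (c : Nat) : Option Nat :=
  if h : c < T.length then
    (if T.getD c 0 ≠ 0 then some c else pvFirstAlive T (c+1))
  else none
termination_by T.length - c

theorem pvFirstAlive_some {T : List Int} {c j : Nat} (h : pvFirstAlive T c = some j) :
    c ≤ j ∧ j < T.length ∧ T.getD j 0 ≠ 0 := by
  fun_induction pvFirstAlive T c with
  | case1 c h1 h2 => refine ⟨by simp_all, by simp_all, by simp_all⟩
  | case2 c h1 h2 ih =>
    have := ih h
    exact ⟨by omega, this.2.1, this.2.2⟩
  | case3 c h1 => simp_all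

theorem pvFirstAlive_none {T : List Int} {c : Nat} :
    pvFirstAlive T c = none ↔ ∀ j, c ≤ j → j < T.length → T.getD j 0 = 0 := by
  fun_induction pvFirstAlive T c with
  | case1 c h1 h2 =>
    simp only [reduceCtorEq, false_iff]
    intro hall; exact h2 (hall c le_rfl h1)
  | case2 c h1 h2 ih =>
    rw [ih]
    constructor
    · intro hall j hcj hj
      rcases Nat.eq_or_lt_of_le hcj with rfl | hlt
      · simpa using h2
      · exact hall j hlt hj
    · intro hall j hcj hj; exact hall j (by omega) hj
  | case3 c h1 =>
    simp only [true_iff]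
    intro j hcj hj; omega

theorem pvFirstAlive_min {T : List Int} {c j : Nat} (h : pvFirstAlive T c = some j) :
    ∀ j', c ≤ j' → j' < j → T.getD j' 0 = 0 := by
  fun_induction pvFirstAlive T c with
  | case1 c h1 h2 =>
    intro j' h3 h4
    simp only [Option.some.injEq] at h
    omega
  | case2 c h1 h2 ih =>
    intro j' h3 h4
    rcases Nat.eq_or_lt_of_le h3 with rfl | hlt
    · simpa using h2
    · exact ih h j' hlt h4
  | case3 c h1 => simp_all

theorem pvFirstAlive_le {T : List Int} {c a : Nat} (hca : c ≤ a) (ha : a < T.length)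
    (hnz : T.getD a 0 ≠ 0) : ∃ j, pvFirstAlive T c = some j ∧ j ≤ a := by
  cases hfa : pvFirstAlive T c with
  | none => exact absurd (pvFirstAlive_none.mp hfa a hca ha) hnz
  | some j =>
    refine ⟨j, rfl, ?_⟩
    by_contra hja
    exact hnz (pvFirstAlive_min hfa a hca (by omega))


theorem pvNextFuel_succ (T : List Int) (cur : Int) (f : Nat) :
    pvNextFuel T cur (f+1) =
      if (T.length : Int) ≤ cur then pvNextFuel T 0 f
      else if PySem.List.pyGetD T cur 0 ≠ 0 then cur
      else pvNextFuel T (cur + 1) f := rfl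

theorem pvNextFuel_scan {T : List Int} {c j : Nat} (h : pvFirstAlive T c = some j) :
    ∀ fuel, j - c < fuel → pvNextFuel T (c : Int) fuel = (j : Int) := by
  intro fuel
  induction fuel generalizing c with
  | zero => omega
  | succ f ih =>
    intro hf
    obtain ⟨hcj, hjl, hnz⟩ := pvFirstAlive_some h
    have hcl : c < T.length := by omega
    rw [pvNextFuel_succ, if_neg (by exact_mod_cast Nat.not_le.mpr hcl)]
    rw [PySem.List.pyGetD_natCast]
    unfold pvFirstAlive at h
    rw [dif_pos hcl] at h
    by_cases hz : T.getD c 0 ≠ 0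
    · rw [if_pos hz]
      rw [if_pos hz] at h
      simp only [Option.some.injEq] at h
      subst h; rfl
    · rw [if_neg hz]
      rw [if_neg hz] at h
      have := pvFirstAlive_some h
      have : ((c : Int) + 1) = ((c + 1 : Nat) : Int) := by push_cast; ring
      rw [this]
      exact ih ‹pvFirstAlive T (c+1) = some j› (by omega)

theorem pvNextFuel_wrap {T : List Int} {c : Nat} (hc : c ≤ T.length)
    (h : pvFirstAlive T c = none) :
    ∀ fuel, T.length - c < fuel →
      pvNextFuel T (c : Int) fuel = pvNextFuel T 0 (fuel - (T.length - c) - 1) := by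
  intro fuel
  induction fuel generalizing c with
  | zero => omega
  | succ f ih =>
    intro hf
    rw [pvNextFuel_succ]
    by_cases hcl : c < T.length
    · rw [if_neg (by exact_mod_cast Nat.not_le.mpr hcl)]
      unfold pvFirstAlive at h
      rw [dif_pos hcl] at h
      by_cases hz : T.getD c 0 ≠ 0
      · rw [if_pos hz] at h; exact absurd h (by simp)
      · rw [if_neg hz] at h
        rw [PySem.List.pyGetD_natCast, if_neg (by simpa using not_not.mp hz)]
        have hcast : ((c : Int) + 1) = ((c + 1 : Nat) : Int) := by push_cast; ring
        rw [hcast, ih (by omega) h (by omega)]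
        have he : f - (T.length - (c+1)) - 1 = f + 1 - (T.length - c) - 1 := by omega
        rw [he]
    · have hceq : c = T.length := by omega
      rw [if_pos (by exact_mod_cast Nat.le_of_eq hceq.symm)]
      have he : f + 1 - (T.length - c) - 1 = f := by omega
      rw [he]


theorem pvNext_eq_of_some {T : List Int} {i : Int} {j : Nat} (hi : -1 ≤ i)
    (h : pvFirstAlive T (i+1).toNat = some j) : pvNext T i = (j : Int) := by
  have hc : (i + 1) = (((i+1).toNat : Nat) : Int) := by omega
  unfold pvNext
  rw [hc]
  exact pvNextFuel_scan h _ (by have := pvFirstAlive_some h; omega)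

theorem pvNext_eq_of_none {T : List Int} {i : Int} {j0 : Nat} (hi : -1 ≤ i)
    (hlen : (i+1).toNat ≤ T.length) (h : pvFirstAlive T (i+1).toNat = none)
    (h0 : pvFirstAlive T 0 = some j0) : pvNext T i = (j0 : Int) := by
  have hc : (i + 1) = (((i+1).toNat : Nat) : Int) := by omega
  unfold pvNext
  rw [hc, pvNextFuel_wrap hlen h _ (by omega)]
  have h0' := pvFirstAlive_some h0
  have : ((0 : Nat) : Int) = (0 : Int) := rfl
  rw [← this]
  exact pvNextFuel_scan h0 _ (by omega)

theorem pvAllZero_iff {T : List Int} :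
    (T.all (fun x => x == 0)) = true ↔ ∀ j, j < T.length → T.getD j 0 = 0 := by
  rw [List.all_eq_true]
  constructor
  · intro h j hj
    rw [List.getD_eq_getElem T 0 hj]
    simpa using h _ (T.getElem_mem hj)
  · intro h x hx
    obtain ⟨j, hj, rfl⟩ := List.mem_iff_getElem.mp hx
    simpa using (List.getD_eq_getElem T 0 hj) ▸ h j hj

def pvAL (T : List Int) : List Nat :=
  (List.range T.length).filter (fun j => decide (T.getD j 0 ≠ 0))

theorem pvAL_mem {T : List Int} {j : Nat} :
    j ∈ pvAL T ↔ j < T.length ∧ T.getD j 0 ≠ 0 := by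
  simp [pvAL, List.mem_filter]

theorem pvAL_sorted (T : List Int) : (pvAL T).Pairwise (· < ·) := by
  exact List.Pairwise.filter _ (List.pairwise_lt_range)

theorem pvAL_nil {T : List Int} : pvAL T = [] ↔ ∀ j, j < T.length → T.getD j 0 = 0 := by
  rw [pvAL, List.filter_eq_nil_iff]
  simp

theorem pvGetD_set_ne {T : List Int} {a j : Nat} {v : Int} (h : a ≠ j) :
    (T.set a v).getD j 0 = T.getD j 0 := by
  simp [List.getD_eq_getElem?_getD, List.getElem?_set_ne h]

theorem pvGetD_set_self {T : List Int} {a : Nat} {v : Int} (h : a < T.length) :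
    (T.set a v).getD a 0 = v := by
  simp [List.getD_eq_getElem?_getD, h]


theorem pvSolLoop_succ (T : List Int) (i : Int) (t : Nat) :
    pvSolLoop T i (t+1) =
      if T.all (fun x => x == 0) then -1
      else
        pvSolLoop (PySem.List.pySetD T (pvNext T i) (PySem.List.pyGetD T (pvNext T i) 0 - 1))
          (pvNext T i) t := rfl

-- one bite: from state (T, i) with `a` the least alive index above i
theorem pvStep_eq {rest : List Nat} {T : List Int} {i : Int} {a : Nat} {rs : List Nat}
    (hrest : rest = a :: rs)
    (hi : -1 ≤ i)
    (hmem : ∀ j ∈ rest, i < (j : Int) ∧ j < T.length ∧ T.getD j 0 ≠ 0)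
    (hsorted : rest.Pairwise (· < ·))
    (hcomp : ∀ j : Nat, i < (j : Int) → j < T.length → T.getD j 0 ≠ 0 → j ∈ rest)
    (t : Nat) :
    pvSolLoop T i (t+1) = pvSolLoop (T.set a (T.getD a 0 - 1)) ((a : Nat) : Int) t := by
  subst hrest
  obtain ⟨hia, hal, hanz⟩ := hmem a (List.mem_cons_self)
  have hnotall : ¬ (T.all (fun x => x == 0) = true) := by
    rw [pvAllZero_iff]
    intro h; exact hanz (h a hal)
  have hca : (i+1).toNat ≤ a := by omega
  obtain ⟨j, hfa, hja⟩ := pvFirstAlive_le hca hal hanz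
  obtain ⟨hcj, hjl, hjnz⟩ := pvFirstAlive_some hfa
  have hij : i < (j : Int) := by omega
  have hjmem : j ∈ a :: rs := hcomp j hij hjl hjnz
  have hjeq : j = a := by
    rcases List.mem_cons.mp hjmem with rfl | hjrs
    · rfl
    · exact absurd ((List.pairwise_cons.mp hsorted).1 j hjrs) (by omega)
  subst hjeq
  have hnext : pvNext T i = (j : Int) := pvNext_eq_of_some hi hfa
  rw [pvSolLoop_succ, if_neg hnotall, hnext]
  simp [PySem.List.pySetD_natCast, PySem.List.pyGetD_natCast]

theorem pvRound_in {rest : List Nat} {T : List Int} {i : Int} {m : Nat}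
    (hi : -1 ≤ i)
    (hmem : ∀ j ∈ rest, i < (j : Int) ∧ j < T.length ∧ T.getD j 0 ≠ 0)
    (hsorted : rest.Pairwise (· < ·))
    (hcomp : ∀ j : Nat, i < (j : Int) → j < T.length → T.getD j 0 ≠ 0 → j ∈ rest)
    (h1 : 1 ≤ m) (h2 : m ≤ rest.length) :
    pvSolLoop T i m = (rest.getD (m-1) 0 : Int) + 1 := by
  induction rest generalizing T i m with
  | nil => simp at h2; omega
  | cons a rs ih =>
    obtain ⟨mm, rfl⟩ : ∃ mm, m = mm + 1 := ⟨m - 1, by omega⟩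
    obtain ⟨hia, hal, hanz⟩ := hmem a (List.mem_cons_self)
    rw [pvStep_eq rfl hi hmem hsorted hcomp]
    set T1 := T.set a (T.getD a 0 - 1) with hT1
    have hlen1 : T1.length = T.length := by simp [hT1]
    rcases Nat.eq_zero_or_pos mm with rfl | hmm
    · simp [pvSolLoop]
    · have hrs_gt : ∀ j ∈ rs, a < j := (List.pairwise_cons.mp hsorted).1
      have hres := ih (T := T1) (i := (a : Int)) (by omega)
        (fun j hj => ⟨by exact_mod_cast hrs_gt j hj,
                      by rw [hlen1]; exact (hmem j (List.mem_cons_of_mem a hj)).2.1,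
                      by rw [hT1, pvGetD_set_ne (by have := hrs_gt j hj; omega)]
                         exact (hmem j (List.mem_cons_of_mem a hj)).2.2⟩)
        ((List.pairwise_cons.mp hsorted).2)
        (fun j hja hjl hjnz => by
          have hne : a ≠ j := by omega
          rw [hT1, pvGetD_set_ne hne] at hjnz
          rcases List.mem_cons.mp (hcomp j (by omega) (hlen1 ▸ hjl) hjnz) with rfl | h
          · exact absurd hja (by omega)
          · exact h)
        hmm (by simpa using h2)
      rw [hres]
      obtain ⟨p, rfl⟩ : ∃ p, mm = p + 1 := ⟨mm - 1, by omega⟩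
      simp

def pvDecList (T : List Int) (rest : List Nat) : List Int :=
  rest.foldl (fun ts j => ts.set j (ts.getD j 0 - 1)) T

theorem pvDecList_cons (T : List Int) (a : Nat) (rs : List Nat) :
    pvDecList T (a :: rs) = pvDecList (T.set a (T.getD a 0 - 1)) rs := rfl

theorem pvRound_full {rest : List Nat} {T : List Int} {i : Int} {m : Nat}
    (hi : -1 ≤ i)
    (hmem : ∀ j ∈ rest, i < (j : Int) ∧ j < T.length ∧ T.getD j 0 ≠ 0)
    (hsorted : rest.Pairwise (· < ·))
    (hcomp : ∀ j : Nat, i < (j : Int) → j < T.length → T.getD j 0 ≠ 0 → j ∈ rest)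
    (h2 : rest.length < m) (hne : rest ≠ []) :
    pvSolLoop T i m = pvSolLoop (pvDecList T rest) ((rest.getLast hne : Nat) : Int) (m - rest.length) := by
  induction rest generalizing T i m with
  | nil => exact absurd rfl hne
  | cons a rs ih =>
    obtain ⟨mm, rfl⟩ : ∃ mm, m = mm + 1 := ⟨m - 1, by omega⟩
    obtain ⟨hia, hal, hanz⟩ := hmem a (List.mem_cons_self)
    rw [pvStep_eq rfl hi hmem hsorted hcomp]
    set T1 := T.set a (T.getD a 0 - 1) with hT1
    have hlen1 : T1.length = T.length := by simp [hT1]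
    have hrs_gt : ∀ j ∈ rs, a < j := (List.pairwise_cons.mp hsorted).1
    rcases List.eq_nil_or_concat rs with rfl | hrs_ne
    · simp [pvDecList, hT1]
    · have hrsne : rs ≠ [] := by rcases hrs_ne with ⟨l, x, rfl⟩; simp
      have hres := ih (T := T1) (i := (a : Int)) (by omega)
        (fun j hj => ⟨by exact_mod_cast hrs_gt j hj,
                      by rw [hlen1]; exact (hmem j (List.mem_cons_of_mem a hj)).2.1,
                      by rw [hT1, pvGetD_set_ne (by have := hrs_gt j hj; omega)]
                         exact (hmem j (List.mem_cons_of_mem a hj)).2.2⟩)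
        ((List.pairwise_cons.mp hsorted).2)
        (fun j hja hjl hjnz => by
          have hne2 : a ≠ j := by omega
          rw [hT1, pvGetD_set_ne hne2] at hjnz
          rcases List.mem_cons.mp (hcomp j (by omega) (hlen1 ▸ hjl) hjnz) with rfl | h
          · exact absurd hja (by omega)
          · exact h)
        (m := mm) (by simpa using h2) hrsne
      rw [hres, pvDecList_cons]
      simp [List.getLast_cons hrsne, hT1, List.getD_eq_getElem?_getD]

theorem pvRestart {T : List Int} {i : Int} {m : Nat} (hm : 1 ≤ m) (h0 : 0 ≤ i)
    (hlen : i < (T.length : Int))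
    (hz : ∀ j : Nat, i < (j : Int) → j < T.length → T.getD j 0 = 0) :
    pvSolLoop T i m = pvSolLoop T (-1) m := by
  obtain ⟨t, rfl⟩ : ∃ t, m = t + 1 := ⟨m - 1, by omega⟩
  rw [pvSolLoop_succ, pvSolLoop_succ]
  by_cases hall : T.all (fun x => x == 0) = true
  · rw [if_pos hall, if_pos hall]
  · rw [if_neg hall, if_neg hall]
    cases h0' : pvFirstAlive T 0 with
    | none =>
      exact absurd (pvAllZero_iff.mpr (fun j hj => pvFirstAlive_none.mp h0' j (Nat.zero_le j) hj)) hall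
    | some j0 =>
      have hnone : pvFirstAlive T (i+1).toNat = none := by
        rw [pvFirstAlive_none]
        intro j hcj hjl
        exact hz j (by omega) hjl
      have h1 : pvNext T i = (j0 : Int) :=
        pvNext_eq_of_none (by omega) (by omega) hnone h0'
      have h2 : pvNext T (-1) = (j0 : Int) :=
        pvNext_eq_of_some (by omega) (by simpa using h0')
      rw [h1, h2]

theorem pvDecList_getD {rest : List Nat} {T : List Int} (hs : rest.Pairwise (· < ·))
    (hlt : ∀ j ∈ rest, j < T.length) :
    (pvDecList T rest).length = T.length ∧
    ∀ j' : Nat, (pvDecList T rest).getD j' 0 = if j' ∈ rest then T.getD j' 0 - 1 else T.getD j' 0 := by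
  induction rest generalizing T with
  | nil => exact ⟨rfl, fun j' => by simp [pvDecList]⟩
  | cons a rs ih =>
    have ha := hlt a (List.mem_cons_self)
    have hgt := (List.pairwise_cons.mp hs).1
    rw [pvDecList_cons]
    set T1 := T.set a (T.getD a 0 - 1) with hT1
    have h1 := ih (T := T1) (List.pairwise_cons.mp hs).2
      (fun j hj => by rw [hT1, List.length_set]; exact hlt j (List.mem_cons_of_mem a hj))
    refine ⟨by rw [h1.1, hT1, List.length_set], fun j' => ?_⟩
    rw [h1.2 j']
    by_cases hjr : j' ∈ rs
    · have hne : a ≠ j' := by have := hgt j' hjr; omega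
      rw [if_pos hjr, if_pos (List.mem_cons_of_mem a hjr), hT1, pvGetD_set_ne hne]
    · rw [if_neg hjr]
      by_cases hja : j' = a
      · subst hja
        rw [if_pos (List.mem_cons_self), hT1, pvGetD_set_self ha]
      · rw [if_neg (by simp [hja, hjr]), hT1, pvGetD_set_ne (by omega)]

theorem pvGetD_map_dec {T : List Int} (g : Int → Int) (hg : g 0 = 0) (j : Nat) :
    (T.map g).getD j 0 = g (T.getD j 0) := by
  by_cases hj : j < T.length
  · rw [List.getD_eq_getElem _ _ (by simpa using hj), List.getD_eq_getElem _ _ hj]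
    simp
  · rw [List.getD_eq_default _ _ (by simpa using Nat.le_of_not_lt hj),
        List.getD_eq_default _ _ (by omega)]
    exact hg.symm

theorem pvDecList_AL (T : List Int) :
    pvDecList T (pvAL T) = T.map (fun t => if t ≠ 0 then t - 1 else t) := by
  have h := pvDecList_getD (T := T) (pvAL_sorted T) (fun j hj => (pvAL_mem.mp hj).1)
  apply List.ext_getElem
  · rw [h.1]; simp
  · intro j hj1 hj2
    have hjlen : j < T.length := by rw [h.1] at hj1; exact hj1
    have := h.2 j
    rw [List.getD_eq_getElem _ _ hj1, List.getD_eq_getElem _ _ hjlen] at this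
    rw [this]
    have hmap : (T.map (fun t => if t ≠ 0 then t - 1 else t))[j] = (fun t => if t ≠ 0 then t - 1 else t) T[j] := by simp
    rw [hmap]
    by_cases hz : T[j] = 0
    · rw [if_neg (by rw [pvAL_mem]; rintro ⟨-, hne⟩; exact hne (by rw [List.getD_eq_getElem _ _ hjlen]; exact hz))]
      simp [hz]
    · rw [if_pos (pvAL_mem.mpr ⟨hjlen, by rw [List.getD_eq_getElem _ _ hjlen]; exact hz⟩)]
      simp [hz]

theorem pvLe_getLast {l : List Nat} (hs : l.Pairwise (· < ·)) (hne : l ≠ []) :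
    ∀ x ∈ l, x ≤ l.getLast hne := by
  induction l with
  | nil => simp
  | cons a rs ih =>
    intro x hx
    rcases List.eq_nil_or_concat rs with rfl | hrs
    · simp at hx; simp [hx]
    · have hrsne : rs ≠ [] := by rcases hrs with ⟨l', b, rfl⟩; simp
      rw [List.getLast_cons hrsne]
      rcases List.mem_cons.mp hx with rfl | hxr
      · have hlast := List.getLast_mem hrsne
        exact le_of_lt ((List.pairwise_cons.mp hs).1 _ hlast)
      · exact ih (List.pairwise_cons.mp hs).2 hrsne x hxr

theorem pvMap_g_zero (T : List Int) : T.map (fun t => if t ≠ 0 then t - ((0:Nat):Int) else t) = T := by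
  rw [List.map_congr_left (g := id) (fun t _ => by simp), List.map_id]

theorem pvAL_map_dec {T : List Int} {r : Nat} (hr : 1 ≤ r)
    (hmin : ∀ t ∈ T, 0 < t → (r : Int) + 1 ≤ t) :
    pvAL (T.map (fun t => if t ≠ 0 then t - 1 else t)) = pvAL T := by
  unfold pvAL
  rw [List.length_map]
  refine List.filter_congr (fun j hj => ?_)
  rw [List.mem_range] at hj
  rw [pvGetD_map_dec _ (by simp)]
  set t := T.getD j 0 with ht
  have htm : t ∈ T := by rw [ht, List.getD_eq_getElem _ _ hj]; exact List.getElem_mem hj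
  by_cases hz : t = 0
  · simp [hz]
  · rw [if_pos hz]
    have : t - 1 ≠ 0 := by
      rcases lt_or_gt_of_ne hz with hneg | hpos
      · omega
      · have := hmin t htm hpos; omega
    simp [hz, this]

theorem pvMap_comp {T : List Int} {r : Nat}
    (hmin : ∀ t ∈ T, 0 < t → (r : Int) + 1 ≤ t) :
    (T.map (fun t => if t ≠ 0 then t - 1 else t)).map (fun t => if t ≠ 0 then t - (r:Int) else t)
      = T.map (fun t => if t ≠ 0 then t - ((r:Int)+1) else t) := by
  rw [List.map_map]
  refine List.map_congr_left (fun t htm => ?_)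
  simp only [Function.comp]
  by_cases hz : t = 0
  · simp [hz]
  · by_cases h1 : t - 1 = 0
    · have ht1 : t = 1 := by omega
      have : r = 0 := by have := hmin t htm (by omega); omega
      simp [this, ht1]
    · simp [hz, h1]
      omega

theorem pvMultiRound : ∀ (r : Nat) (T : List Int) (m : Nat),
    (∀ t ∈ T, 0 < t → (r : Int) ≤ t) → r * (pvAL T).length < m → (r = 0 ∨ pvAL T ≠ []) →
    pvSolLoop T (-1) m =
      pvSolLoop (T.map (fun t => if t ≠ 0 then t - (r : Int) else t)) (-1) (m - r * (pvAL T).length) := by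
  intro r
  induction r with
  | zero => intro T m _ _ _; rw [pvMap_g_zero]; simp
  | succ r ih =>
    intro T m hmin hm hd
    have hALne : pvAL T ≠ [] := hd.resolve_left (by omega)
    set L := (pvAL T).length with hL
    have hLpos : 0 < L := by
      rw [hL, List.length_pos_iff]; exact hALne
    have hmin' : ∀ t ∈ T, 0 < t → (r : Int) + 1 ≤ t := by
      intro t ht hp; have := hmin t ht hp; push_cast at this ⊢; omega
    -- one full round
    have hround := pvRound_full (rest := pvAL T) (T := T) (i := -1) (m := m)
      (by omega)
      (fun j hj => ⟨by omega, (pvAL_mem.mp hj).1, (pvAL_mem.mp hj).2⟩)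
      (pvAL_sorted T)
      (fun j _ hjl hjnz => pvAL_mem.mpr ⟨hjl, hjnz⟩)
      (by have h' : (r+1)*L = r*L + L := by ring
          omega) hALne
    rw [pvDecList_AL] at hround
    set T1 := T.map (fun t => if t ≠ 0 then t - 1 else t) with hT1
    have hlen1 : T1.length = T.length := by rw [hT1, List.length_map]
    have hlast := List.getLast_mem hALne
    have hlastlt : (pvAL T).getLast hALne < T.length := (pvAL_mem.mp hlast).1
    have hrestart := pvRestart (T := T1) (i := ((pvAL T).getLast hALne : Int)) (m := m - L)
      (by have h' : (r+1)*L = r*L + L := by ring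
          omega) (by omega) (by exact_mod_cast hlen1 ▸ hlastlt)
      (fun j hjg hjl => by
        rw [hT1, pvGetD_map_dec _ (by simp)]
        have hjz : T.getD j 0 = 0 := by
          by_contra hnz
          have hjal : j ∈ pvAL T := pvAL_mem.mpr ⟨hlen1 ▸ hjl, hnz⟩
          have := pvLe_getLast (pvAL_sorted T) hALne j hjal
          omega
        rw [hjz]
        simp)
    rw [hrestart] at hround
    -- the remaining r rounds, via the inductive hypothesis
    have hmin1 : ∀ t ∈ T1, 0 < t → (r : Int) ≤ t := by
      intro t' ht' hp'
      rw [hT1] at ht'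
      obtain ⟨t, htm, rfl⟩ := List.mem_map.mp ht'
      by_cases hz : t = 0
      · simp [hz] at hp'
      · rw [if_pos hz] at hp' ⊢
        have := hmin' t htm (by omega)
        omega
    have hALT1 : r = 0 ∨ pvAL T1 = pvAL T := by
      rcases Nat.eq_zero_or_pos r with rfl | hr
      · exact Or.inl rfl
      · exact Or.inr (hT1 ▸ pvAL_map_dec hr hmin')
    have hbound : r * (pvAL T1).length < m - L := by
      rcases hALT1 with rfl | heq
      · omega
      · rw [heq, ← hL]
        have h' : (r+1)*L = r*L + L := by ring
        omega
    have hdisj : r = 0 ∨ pvAL T1 ≠ [] := by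
      rcases hALT1 with rfl | heq
      · exact Or.inl rfl
      · exact Or.inr (heq ▸ hALne)
    rw [hround, ih T1 (m - L) hmin1 hbound hdisj, hT1, pvMap_comp hmin']
    have harith : m - L - r * (pvAL T1).length = m - (r+1) * L := by
      rcases hALT1 with rfl | heq
      · omega
      · rw [heq, ← hL]
        have h' : (r+1)*L = r*L + L := by ring
        omega
    rw [harith]
    have hcast : (((r+1 : Nat)) : Int) = (r : Int) + 1 := by push_cast; ring
    rw [hcast]

theorem pvAlive_bridge (T : List Int) :
    ((PySem.List.enumerate T 0).filter (fun p => decide (p.2 ≠ 0))).map (fun p => p.1)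
      = (pvAL T).map Int.ofNat := by
  unfold pvAL
  rw [PySem.List.enumerate_eq_map_pyRange (d := 0), PySem.List.pyRange_one]
  simp only [List.filter_map, List.map_map, Function.comp_def]
  simp [List.getD_eq_getElem?_getD]


theorem pvAltLoop_succ (times : List Int) (remain : Int) (f : Nat) :
    pvAltLoop times remain (f+1) =
      (let alive := ((PySem.List.enumerate times 0).filter (fun p => decide (p.2 ≠ 0))).map (fun p => p.1)
       if alive.isEmpty then -1
       else if remain ≤ (alive.length : Int) then PySem.List.pyGetD alive (remain - 1) 0 + 1
       else
         let full := PySem.Int.floordiv (remain - 1) (alive.length : Int)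
         let pos := times.filter (fun t => decide (0 < t))
         let r := match PySem.List.min? pos (fun x => x) with
                  | some mp => min full mp
                  | none => full
         pvAltLoop (times.map (fun t => if t ≠ 0 then t - r else t)) (remain - r * (alive.length : Int)) f) := rfl

theorem pvMain : ∀ (m : Nat) (T : List Int) (remain : Int) (fuel : Nat),
    1 ≤ remain → remain.toNat = m → m < fuel →
    pvSolLoop T (-1) m = pvAltLoop T remain fuel := by
  intro m
  induction m using Nat.strong_induction_on with
  | _ m ih =>
  intro T remain fuel h1 h2 h3
  obtain ⟨f, rfl⟩ : ∃ f, fuel = f + 1 := ⟨fuel - 1, by omega⟩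
  obtain ⟨mm, hmm⟩ : ∃ mm, m = mm + 1 := ⟨m - 1, by omega⟩
  rw [pvAltLoop_succ]
  simp only [pvAlive_bridge]
  set L := (pvAL T).length with hL
  have hlenmap : ((pvAL T).map Int.ofNat).length = L := by rw [List.length_map]
  by_cases hnil : pvAL T = []
  · have hA : pvSolLoop T (-1) m = -1 := by
      rw [hmm, pvSolLoop_succ, if_pos (pvAllZero_iff.mpr (pvAL_nil.mp hnil))]
    rw [hA, hnil]
    simp
  · rw [if_neg (by simp [List.isEmpty_iff]; exact hnil)]
    have hLpos : 0 < L := by rw [hL, List.length_pos_iff]; exact hnil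
    rw [hlenmap]
    by_cases hsmall : remain ≤ ((L : Nat) : Int)
    · rw [if_pos hsmall]
      have hround := pvRound_in (rest := pvAL T) (T := T) (i := -1) (m := m)
        (by omega)
        (fun j hj => ⟨by omega, (pvAL_mem.mp hj).1, (pvAL_mem.mp hj).2⟩)
        (pvAL_sorted T)
        (fun j _ hjl hjnz => pvAL_mem.mpr ⟨hjl, hjnz⟩)
        (by omega) (by omega)
      rw [hround]
      have hidx : remain - 1 = (((m - 1 : Nat)) : Int) := by omega
      rw [hidx, PySem.List.pyGetD_natCast]
      have hm1 : m - 1 < (pvAL T).length := by omega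
      congr 1
      rw [List.getD_eq_getElem _ _ hm1, List.getD_eq_getElem _ _ (by simpa using hm1)]
      simp
    · rw [if_neg hsmall]
      have hbig : (L : Int) < remain := by omega
      set full := PySem.Int.floordiv (remain - 1) (L : Int) with hfull
      set rI := (match PySem.List.min? (T.filter (fun t => decide (0 < t))) (fun x => x) with
                 | some mp => min full mp
                 | none => full) with hrI
      have hfull_ediv : full = (remain - 1) / (L : Int) := by
        rw [hfull, PySem.Int.floordiv_eq_ediv_of_pos (by exact_mod_cast hLpos)]
      have hfull1 : 1 ≤ full := by
        rw [hfull_ediv]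
        rw [Int.le_ediv_iff_mul_le (by exact_mod_cast hLpos)]
        omega
      have hrI1 : 1 ≤ rI := by
        rw [hrI]
        cases hmin : PySem.List.min? (T.filter (fun t => decide (0 < t))) (fun x => x) with
        | none => simpa using hfull1
        | some mp =>
          have hmem := PySem.List.min?_mem hmin
          have : 0 < mp := by simpa using (List.mem_filter.mp hmem).2
          exact le_min hfull1 (by omega)
      have hrIfull : rI ≤ full := by
        rw [hrI]
        cases hmin : PySem.List.min? (T.filter (fun t => decide (0 < t))) (fun x => x) with
        | none => simp
        | some mp => exact min_le_left _ _
      have hrImin : ∀ t ∈ T, 0 < t → rI ≤ t := by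
        intro t ht hp
        have htf : t ∈ T.filter (fun t => decide (0 < t)) := List.mem_filter.mpr ⟨ht, by simpa using hp⟩
        cases hmin : PySem.List.min? (T.filter (fun t => decide (0 < t))) (fun x => x) with
        | none => rw [PySem.List.min?_eq_none_iff] at hmin; rw [hmin] at htf; simp at htf
        | some mp =>
          have hle := PySem.List.min?_isMin hmin t htf
          rw [hrI, hmin]
          exact le_trans (min_le_right _ _) hle
      have hrL : rI * (L : Int) ≤ remain - 1 := by
        have h0L : (0 : Int) < (L : Int) := by exact_mod_cast hLpos
        have hfl : full * (L : Int) ≤ remain - 1 :=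
          (Int.le_ediv_iff_mul_le h0L).mp (le_of_eq hfull_ediv)
        calc rI * (L : Int) ≤ full * L := mul_le_mul_of_nonneg_right hrIfull (le_of_lt h0L)
          _ ≤ remain - 1 := hfl
      set rN := rI.toNat with hrN
      have hrNI : ((rN : Nat) : Int) = rI := by omega
      have hrem : remain = (m : Int) := by omega
      have hcastL : ((rN * L : Nat) : Int) = rI * (L : Int) := by push_cast [hrNI]; rfl
      have hstep : rN * L < m := by omega
      have hmr := pvMultiRound rN T m (fun t ht hp => hrNI ▸ hrImin t ht hp) hstep (Or.inr hnil)
      rw [hmr, ← hrNI]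
      have hprod : 0 < rN * L := Nat.mul_pos (by omega) hLpos
      exact ih (m - rN * L) (by omega)
        _ (remain - (rN : Int) * (L : Int)) f
        (by rw [hrNI]; omega) (by rw [hrNI]; omega) (by omega)

-- ===== VERDICT (by name: the statement is the Claim_ definition above) =====
theorem solution_spec : Claim_equal_solution := by
  intro ft k _ hpre
  unfold Spec_solution solution solution_alt
  exact pvMain (k+1).toNat ft (k+1) ((k+1).toNat + 1)
    (by unfold Pre_solution at hpre; omega) rfl (Nat.lt_succ_self _)
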